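-- pv_equiv track=rewrite | github.com/HuzaifaaNaveed/LafzEngine | codes/tr_only.py | _merge_consecutive_capitals
-- ===== SOURCE A (Python) =====
-- def _merge_consecutive_capitals(sentence: str) -> str:
--     words = sentence.split()
--     result = []
--     i = 0
--
--     while i < len(words):
--         word = words[i]
--
--         if len(word) == 1 and word.isupper():
--             consecutive_capitals = [word]
--             j = i + 1
--
--             while j < len(words) and len(words[j]) == 1 and words[j].isupper():
--                 consecutive_capitals.append(words[j])
--                 j += 1
--
--             if len(consecutive_capitals) > 1:
--                 result.append(''.join(consecutive_capitals))
--                 i = j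
--             else:
--                 result.append(word)
--                 i += 1
--         else:
--             result.append(word)
--             i += 1
--
--     return ' '.join(result)
-- ===== SOURCE B (Python) =====
-- def _merge_consecutive_capitals(sentence: str) -> str:
--     out = []
--     buf = []
--     for w in sentence.split():
--         if len(w) == 1 and w.isupper():
--             buf.append(w)
--         else:
--             if buf:
--                 out.append(''.join(buf))
--                 buf = []
--             out.append(w)
--     if buf:
--         out.append(''.join(buf))
--     return ' '.join(out)
-- ===== Notes on version B (the rewrite author's own statement) =====
-- stated objective: idiomatic
-- what changed: Replaced A's index-driven outer while with a nested inner scan over the word list by a single forward pass that buffers consecutive single uppercase letters and flushes the joined buffer on any break or at the end.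
import Mathlib
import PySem

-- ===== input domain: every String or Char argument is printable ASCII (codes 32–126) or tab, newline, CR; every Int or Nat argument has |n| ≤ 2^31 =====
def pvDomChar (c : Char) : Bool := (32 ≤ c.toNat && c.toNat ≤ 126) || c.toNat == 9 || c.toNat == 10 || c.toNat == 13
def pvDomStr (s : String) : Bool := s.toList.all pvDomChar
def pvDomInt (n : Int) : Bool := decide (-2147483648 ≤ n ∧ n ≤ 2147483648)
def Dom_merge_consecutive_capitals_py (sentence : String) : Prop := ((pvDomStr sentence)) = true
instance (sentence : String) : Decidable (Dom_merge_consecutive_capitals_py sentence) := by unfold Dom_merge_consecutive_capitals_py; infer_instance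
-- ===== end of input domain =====

-- B is a single forward pass with an explicit buffer of pending 1-letter capitals, flushed on any
-- break, instead of A's outer index loop with a nested inner scan; same output, simpler structure.

-- ===== PORT A =====
-- Python's `w.isupper()` (exact on the ASCII domain: some cased char and no lowercase one).
def pvIsupperStr (w : String) : Bool :=
  (w.toList.any (fun c => PySem.Chars.isupper c || PySem.Chars.islower c)) &&
  !(w.toList.any (fun c => PySem.Chars.islower c))

-- the condition `len(word) == 1 and word.isupper()`
def pvIsCap (w : String) : Bool := (PySem.Str.len w == 1) && pvIsupperStr w

-- inner `while j < len(words) and …` loop: the consecutive capitals collected and the remaining words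
def pvCollect : List String → List String × List String
  | [] => ([], [])
  | w :: rest =>
    if pvIsCap w then
      let p := pvCollect rest
      (w :: p.1, p.2)
    else ([], w :: rest)

theorem pvCollect_snd_len (ws : List String) : (pvCollect ws).2.length ≤ ws.length := by
  induction ws with
  | nil => simp [pvCollect]
  | cons w rest ih =>
    by_cases h : pvIsCap w = true
    · simp [pvCollect, h]; omega
    · simp [pvCollect, h]

-- outer `while i < len(words)` loop building `result`
def pvGoA : List String → List String
  | [] => []
  | w :: rest =>
    if pvIsCap w then
      let caps := (pvCollect rest).1
      if (w :: caps).length > 1 then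
        PySem.Str.join "" (w :: caps) :: pvGoA (pvCollect rest).2
      else
        w :: pvGoA rest
    else w :: pvGoA rest
termination_by ws => ws.length
decreasing_by
  · have := pvCollect_snd_len rest; simp; omega
  · simp
  · simp

def merge_consecutive_capitals_py (sentence : String) : String :=
  PySem.Str.join " " (pvGoA (PySem.Str.split₀ sentence))

-- ===== PORT B =====
-- fold state: (out, buf); a non-capital flushes the buffer then is appended itself
def pvStepB (st : List String × List String) (w : String) : List String × List String :=
  if pvIsCap w then (st.1, st.2 ++ [w])
  else ((if st.2 = [] then st.1 else st.1 ++ [PySem.Str.join "" st.2]) ++ [w], [])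

-- final flush of a non-empty buffer, then ' '.join
def pvFinishB (st : List String × List String) : List String :=
  if st.2 = [] then st.1 else st.1 ++ [PySem.Str.join "" st.2]

def merge_consecutive_capitals_py_alt (sentence : String) : String :=
  PySem.Str.join " " (pvFinishB ((PySem.Str.split₀ sentence).foldl pvStepB ([], [])))

-- ===== PRECONDITION & SPEC =====
def Spec_merge_consecutive_capitals_py (sentence : String) (out : String) : Prop := out = merge_consecutive_capitals_py_alt sentence
instance (sentence : String) (out : String) : Decidable (Spec_merge_consecutive_capitals_py sentence out) := by unfold Spec_merge_consecutive_capitals_py; infer_instance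

-- ===== CLAIM (what is proved, stated in full; the proofs are below) =====
def Claim_equal_merge_consecutive_capitals_py : Prop := ∀ (sentence : String), Dom_merge_consecutive_capitals_py sentence → Spec_merge_consecutive_capitals_py sentence (merge_consecutive_capitals_py sentence)

-- ===== LEMMAS AND PROOFS =====

-- recursive reformulation of B's fold
def pvBrec : List String → List String → List String
  | buf, [] => if buf = [] then [] else [PySem.Str.join "" buf]
  | buf, w :: ws =>
    if pvIsCap w then pvBrec (buf ++ [w]) ws
    else (if buf = [] then [] else [PySem.Str.join "" buf]) ++ w :: pvBrec [] ws

theorem pvFold_eq_Brec (ws : List String) (out buf : List String) :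
    pvFinishB (ws.foldl pvStepB (out, buf)) = out ++ pvBrec buf ws := by
  induction ws generalizing out buf with
  | nil => by_cases h : buf = [] <;> simp [pvFinishB, pvBrec, h]
  | cons w ws ih =>
    by_cases h : pvIsCap w = true
    · simp only [List.foldl_cons, pvStepB, h, if_pos, pvBrec]
      exact ih out (buf ++ [w])
    · simp only [List.foldl_cons, pvStepB, h, pvBrec, ite_false, Bool.false_eq_true]
      rw [ih]
      by_cases hb : buf = [] <;> simp [hb]

theorem pvBrec_buf (ws : List String) (buf : List String) (hb : buf ≠ []) :
    pvBrec buf ws =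
      PySem.Str.join "" (buf ++ (pvCollect ws).1) :: pvBrec [] (pvCollect ws).2 := by
  induction ws generalizing buf with
  | nil => simp [pvBrec, pvCollect, hb]
  | cons w ws ih =>
    by_cases h : pvIsCap w = true
    · have hb' : buf ++ [w] ≠ [] := by simp
      simp only [pvBrec, h, ite_true, pvCollect, ih (buf ++ [w]) hb', List.append_assoc,
        List.singleton_append]
    · simp [pvBrec, pvCollect, h, hb]

theorem pvCollect_nil_of_fst_nil (ws : List String) (h : (pvCollect ws).1 = []) :
    (pvCollect ws).2 = ws := by
  cases ws with
  | nil => simp [pvCollect]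
  | cons w rest =>
    by_cases hc : pvIsCap w = true
    · simp [pvCollect, hc] at h
    · simp [pvCollect, hc]

theorem pvGoA_eq_Brec_aux (n : Nat) : ∀ ws : List String, ws.length ≤ n → pvGoA ws = pvBrec [] ws := by
  induction n with
  | zero =>
    intro ws h
    have hws : ws = [] := by cases ws with | nil => rfl | cons a b => simp at h
    rw [hws]; simp [pvGoA, pvBrec]
  | succ n ih =>
    intro ws hlen
    cases ws with
    | nil => simp [pvGoA, pvBrec]
    | cons w rest =>
      have hr : rest.length ≤ n := by simp at hlen; omega
      by_cases h : pvIsCap w = true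
      · rw [pvGoA, pvBrec]
        simp only [h, if_true, List.nil_append,
          pvBrec_buf rest [w] (by simp), List.singleton_append]
        by_cases hc : (pvCollect rest).1 = []
        · rw [pvCollect_nil_of_fst_nil rest hc]
          simp [hc, ih rest hr, PySem.Str.join, PySem.Chars.join, List.intercalate]
        · have h2 := ih (pvCollect rest).2 (le_trans (pvCollect_snd_len rest) hr)
          have hgt : (w :: (pvCollect rest).1).length > 1 := by
            cases hx : (pvCollect rest).1 with
            | nil => exact absurd hx hc
            | cons a b => simp
          simp [h2]
          exact fun hx => absurd hx hc
      · simp [pvGoA, pvBrec, h, ih rest hr]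

theorem pvGoA_eq_Brec (ws : List String) : pvGoA ws = pvBrec [] ws :=
  pvGoA_eq_Brec_aux ws.length ws le_rfl

-- ===== VERDICT (by name: the statement is the Claim_ definition above) =====
theorem merge_consecutive_capitals_py_spec : Claim_equal_merge_consecutive_capitals_py := by
  intro sentence _
  unfold Spec_merge_consecutive_capitals_py merge_consecutive_capitals_py
    merge_consecutive_capitals_py_alt
  rw [pvFold_eq_Brec, pvGoA_eq_Brec]
  simp
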